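-- pv_equiv track=rewrite | github.com/miliar/Code_Jam_Webscraper | solutions_python/Problem_55/608.py | countMoney
-- ===== SOURCE A (Python) =====
-- def countMoney(R,K,G):
--     money=0
--     for i in range(R):
--         roller=0
--         count=0
--         while (roller+G[0])<=K :
--
--             roller+=G[0]
--             G.append(G.pop(0))
--             count+=1
--             if len(G)==1 or count==(len(G)): break
--
--         money+=roller
--
--     return money
-- ===== SOURCE B (Python) =====
-- def countMoney(R, K, G):
--     # Index-based runs with cycle detection: O(len(G)^2) instead of O(R*len(G)).
--     # Does not mutate G (A rotates it in place); return-value equivalence only.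
--     n = len(G)
--
--     def run(s):
--         total = 0
--         cnt = 0
--         while total + G[(s + cnt) % n] <= K:
--             total += G[(s + cnt) % n]
--             cnt += 1
--             if n == 1 or cnt == n:
--                 break
--         return total, (s + cnt) % n
--
--     money = 0
--     s = 0
--     r = 0
--     seen = {}
--     skipped = False
--     while r < R:
--         if not skipped and s in seen:
--             r0, m0 = seen[s]
--             L = r - r0
--             cycles = (R - r) // L
--             money += cycles * (money - m0)
--             r += cycles * L
--             skipped = True
--             continue
--         seen[s] = (r, money)
--         g, s = run(s)
--         money += g
--         r += 1
--     return money
-- ===== Notes on version B (the rewrite author's own statement) =====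
-- stated objective: faster
-- what changed: B replaces A's per-run in-place queue rotation with index arithmetic on the unchanged list and detects a cycle in the sequence of run start indices, skipping all repeated runs at once, so cost depends on len(G) instead of R; equivalence is about the return value only (A rotates G in place, B does not mutate it).
import Mathlib
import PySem

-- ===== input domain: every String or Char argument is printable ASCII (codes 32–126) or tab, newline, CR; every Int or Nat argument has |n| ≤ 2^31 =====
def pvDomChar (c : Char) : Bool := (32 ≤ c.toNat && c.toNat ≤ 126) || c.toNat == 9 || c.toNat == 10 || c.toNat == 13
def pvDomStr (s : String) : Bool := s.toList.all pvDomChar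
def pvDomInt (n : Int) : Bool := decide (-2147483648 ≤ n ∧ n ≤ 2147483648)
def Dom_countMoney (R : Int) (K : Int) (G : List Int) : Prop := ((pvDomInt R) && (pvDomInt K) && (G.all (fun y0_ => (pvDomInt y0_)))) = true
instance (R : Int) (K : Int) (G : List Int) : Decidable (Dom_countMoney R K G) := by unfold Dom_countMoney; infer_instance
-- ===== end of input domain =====

-- B replaces A's per-run queue rotation with index arithmetic on the unchanged list plus
-- run-level cycle detection, so repeated runs are skipped; A mutates G in place (rotation),
-- B does not — the equivalence proved here is about the return value only.

-- ===== PORT A =====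
-- A's inner while loop; fuel = G.length suffices because count reaches len(G) and breaks.
-- On G = [] Python raises IndexError (G[0]); excluded by Pre_countMoney.
def innerA (K : Int) : Nat → Int → Nat → List Int → Int × List Int
  | 0, roller, _, G => (roller, G)
  | fuel + 1, roller, count, G =>
    match G with
    | [] => (roller, [])
    | g :: rest =>
      if roller + g ≤ K then
        let roller' := roller + g
        let G' := rest ++ [g]
        let count' := count + 1
        if G'.length = 1 ∨ count' = G'.length then (roller', G')
        else innerA K fuel roller' count' G'
      else (roller, g :: rest)

def countMoney (R : Int) (K : Int) (G : List Int) : Int :=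
  ((List.range R.toNat).foldl
    (fun (st : Int × List Int) _ =>
      let p := innerA K st.2.length 0 0 st.2
      (st.1 + p.1, p.2))
    (0, G)).1

-- ===== PORT B =====
-- Source B's run(s): board groups by index on the static list; fuel = n (cnt reaches n and breaks).
def runB (K : Int) (G : List Int) (n : Nat) : Nat → Nat → Int → Nat → Int × Nat
  | 0, s, total, cnt => (total, (s + cnt) % n)
  | fuel + 1, s, total, cnt =>
    let g := G.getD ((s + cnt) % n) 0
    if total + g ≤ K then
      let total' := total + g
      let cnt' := cnt + 1
      if n = 1 ∨ cnt' = n then (total', (s + cnt') % n)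
      else runB K G n fuel s total' cnt'
    else (total, (s + cnt) % n)

-- Source B's outer while loop with the seen-dict and the one-shot cycle skip.
-- fuel = R.toNat + 2 suffices: every iteration either advances r by ≥ 1 or flips skipped.
def loopB (R : Int) (K : Int) (G : List Int) (n : Nat) :
    Nat → Int → Int → Nat → PySem.Dict Nat (Int × Int) → Bool → Int
  | 0, _, money, _, _, _ => money
  | fuel + 1, r, money, s, seen, skipped =>
    if r < R then
      match (if skipped then none else seen.get? s) with
      | some (r0, m0) =>
        let L := r - r0
        let cycles := PySem.Int.floordiv (R - r) L
        loopB R K G n fuel (r + cycles * L) (money + cycles * (money - m0)) s seen true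
      | none =>
        let seen' := seen.insert s (r, money)
        let p := runB K G n n s 0 0
        loopB R K G n fuel (r + 1) (money + p.1) p.2 seen' skipped
    else money

def countMoney_alt (R : Int) (K : Int) (G : List Int) : Int :=
  loopB R K G G.length (R.toNat + 2) 0 0 0 (PySem.Dict.empty) false

-- ===== PRECONDITION & SPEC =====
-- Pre_ excludes exactly the inputs where Python A raises IndexError: G = [] with R > 0
-- (for R <= 0 the loop body never runs and A returns 0 even on an empty list).
def Pre_countMoney (R : Int) (K : Int) (G : List Int) : Prop := G ≠ [] ∨ R ≤ 0
instance (R : Int) (K : Int) (G : List Int) : Decidable (Pre_countMoney R K G) := by unfold Pre_countMoney; infer_instance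
def pvWitness_countMoney : Int × Int × List Int := (5, 6, [3, 1, 4, 2])

def Spec_countMoney (R : Int) (K : Int) (G : List Int) (out : Int) : Prop := out = countMoney_alt R K G
instance (R : Int) (K : Int) (G : List Int) (out : Int) : Decidable (Spec_countMoney R K G out) := by unfold Spec_countMoney; infer_instance

-- ===== CLAIM (what is proved, stated in full; the proofs are below) =====
def Claim_equal_countMoney : Prop := ∀ (R : Int) (K : Int) (G : List Int), Dom_countMoney R K G → Pre_countMoney R K G → Spec_countMoney R K G (countMoney R K G)

-- ===== LEMMAS AND PROOFS =====

lemma inner_eq_run (K : Int) (G : List Int) (hG : G ≠ []) :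
    ∀ fuel s total cnt,
      innerA K fuel total cnt (G.rotate (s + cnt)) =
        ((runB K G G.length fuel s total cnt).1,
         G.rotate (runB K G G.length fuel s total cnt).2) := by
  have hn : 0 < G.length := List.length_pos_iff.mpr hG
  intro fuel
  induction fuel with
  | zero =>
    intro s total cnt
    simp [innerA, runB, List.rotate_mod]
  | succ fuel ih =>
    intro s total cnt
    have hlen : (G.rotate (s + cnt)).length = G.length := List.length_rotate G _
    obtain ⟨g, rest, hgr⟩ : ∃ g rest, G.rotate (s + cnt) = g :: rest := by
      cases h : G.rotate (s + cnt) with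
      | nil => rw [h] at hlen; simp at hlen; omega
      | cons g rest => exact ⟨g, rest, rfl⟩
    have hidx : (s + cnt) % G.length < G.length := Nat.mod_lt _ hn
    have hg : g = G.getD ((s + cnt) % G.length) 0 := by
      have h0 : (G.rotate (s + cnt))[0]'(by rw [hlen]; omega) = g := by
        simp [hgr]
      rw [List.getElem_rotate] at h0
      rw [List.getD_eq_getElem G 0 hidx]
      simpa using h0.symm
    have hrot1 : rest ++ [g] = G.rotate (s + cnt + 1) := by
      have : (G.rotate (s + cnt)).rotate 1 = G.rotate (s + cnt + 1) := by
        rw [List.rotate_rotate]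
      rw [hgr] at this
      rw [List.rotate_cons_succ, List.rotate_zero] at this
      exact this
    have hlen' : (rest ++ [g]).length = G.length := by
      rw [hrot1, List.length_rotate]
    simp only [innerA, runB, hgr, ← hg, hlen']
    split_ifs with hc hb
    · simp only [hrot1]
      rw [show s + (cnt + 1) = s + cnt + 1 from rfl]
      rw [← List.rotate_mod G (s + cnt + 1)]
    · have := ih s (total + g) (cnt + 1)
      rw [show s + (cnt + 1) = s + cnt + 1 from rfl] at this
      rw [hrot1]
      exact this
    · rw [← hgr, List.rotate_mod]
def stepS (K : Int) (G : List Int) (s : Nat) : Int × Nat := runB K G G.length G.length s 0 0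

def orbS (K : Int) (G : List Int) : Nat → Nat
  | 0 => 0
  | k + 1 => (stepS K G (orbS K G k)).2

def orbM (K : Int) (G : List Int) : Nat → Int
  | 0 => 0
  | k + 1 => orbM K G k + (stepS K G (orbS K G k)).1

lemma countMoney_eq_orbM (R K : Int) (G : List Int) (hG : G ≠ []) :
    countMoney R K G = orbM K G R.toNat := by
  suffices h : ∀ k, (List.range k).foldl
      (fun (st : Int × List Int) _ =>
        let p := innerA K st.2.length 0 0 st.2
        (st.1 + p.1, p.2)) (0, G) = (orbM K G k, G.rotate (orbS K G k)) by
    unfold countMoney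
    rw [h R.toNat]
  intro k
  induction k with
  | zero => simp [orbM, orbS]
  | succ k ih =>
    rw [List.range_succ, List.foldl_append, ih]
    simp only [List.foldl_cons, List.foldl_nil]
    have hlen : (G.rotate (orbS K G k)).length = G.length := List.length_rotate G _
    have := inner_eq_run K G hG G.length (orbS K G k) 0 0
    simp only [Nat.add_zero] at this
    rw [hlen, this]
    simp [orbM, orbS, stepS]

lemma orb_periodic (K : Int) (G : List Int) (a b : Nat)
    (h : orbS K G a = orbS K G b) :
    ∀ t, orbS K G (a + t) = orbS K G (b + t) ∧
         orbM K G (b + t) - orbM K G (a + t) = orbM K G b - orbM K G a := by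
  intro t
  induction t with
  | zero => exact ⟨by simpa using h, by simp⟩
  | succ t ih =>
    obtain ⟨hS, hM⟩ := ih
    constructor
    · show orbS K G ((a + t) + 1) = orbS K G ((b + t) + 1)
      simp [orbS, hS]
    · show orbM K G ((b + t) + 1) - orbM K G ((a + t) + 1) = _
      simp only [orbM, hS]
      omega

lemma orb_cycles (K : Int) (G : List Int) (a b : Nat) (hab : a ≤ b)
    (h : orbS K G a = orbS K G b) :
    ∀ c, orbS K G (b + c * (b - a)) = orbS K G b ∧
         orbM K G (b + c * (b - a)) = orbM K G b + (c : Int) * (orbM K G b - orbM K G a) := by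
  intro c
  induction c with
  | zero => simp
  | succ c ih =>
    obtain ⟨hS, hM⟩ := ih
    have key := orb_periodic K G a b h (c * (b - a) + (b - a))
    have e1 : a + (c * (b - a) + (b - a)) = b + c * (b - a) := by omega
    have e2 : b + (c * (b - a) + (b - a)) = b + (c + 1) * (b - a) := by ring
    rw [e1, e2] at key
    obtain ⟨kS, kM⟩ := key
    refine ⟨by rw [← kS, hS], ?_⟩
    have : orbM K G (b + (c + 1) * (b - a)) = orbM K G (b + c * (b - a)) + (orbM K G b - orbM K G a) := by
      omega
    rw [this, hM]
    push_cast
    ring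
def SeenInv (K : Int) (G : List Int) (seen : PySem.Dict Nat (Int × Int)) (r : Int) : Prop :=
  ∀ s' r0 m0, seen.get? s' = some (r0, m0) →
    0 ≤ r0 ∧ r0 < r ∧ m0 = orbM K G r0.toNat ∧ orbS K G r0.toNat = s'

lemma loopB_correct (R K : Int) (G : List Int) :
    ∀ fuel (r : Int) seen skipped,
      0 ≤ r → r ≤ R →
      (R - r).toNat + (if skipped then 0 else 1) ≤ fuel →
      (skipped = false → SeenInv K G seen r) →
      loopB R K G G.length fuel r (orbM K G r.toNat) (orbS K G r.toNat) seen skipped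
        = orbM K G R.toNat := by
  intro fuel
  induction fuel with
  | zero =>
    intro r seen skipped hr0 hrR hf hInv
    cases skipped with
    | false => simp at hf
    | true =>
      simp only [loopB]
      have : r = R := by omega
      rw [this]
  | succ fuel ih =>
    intro r seen skipped hr0 hrR hf hInv
    simp only [loopB]
    by_cases hr : r < R
    · rw [if_pos hr]
      have hsim : ∀ (seen2 : PySem.Dict Nat (Int × Int)),
          (skipped = false → SeenInv K G seen2 (r + 1)) →
          loopB R K G G.length fuel (r + 1)
            (orbM K G r.toNat + (runB K G G.length G.length (orbS K G r.toNat) 0 0).1)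
            (runB K G G.length G.length (orbS K G r.toNat) 0 0).2 seen2 skipped
            = orbM K G R.toNat := by
        intro seen2 hInv2
        have ht : (r + 1).toNat = r.toNat + 1 := by omega
        have hm : orbM K G r.toNat + (runB K G G.length G.length (orbS K G r.toNat) 0 0).1
            = orbM K G (r + 1).toNat := by
          rw [ht]; simp [orbM, stepS]
        have hs : (runB K G G.length G.length (orbS K G r.toNat) 0 0).2
            = orbS K G (r + 1).toNat := by
          rw [ht]; simp [orbS, stepS]
        rw [hm, hs]
        exact ih (r + 1) seen2 skipped (by omega) (by omega) (by split_ifs at hf ⊢ <;> omega) hInv2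
      cases skipped with
      | true =>
        simp only [if_true]
        exact hsim (seen.insert (orbS K G r.toNat) (r, orbM K G r.toNat)) (by simp)
      | false =>
        rw [if_neg (by simp : ¬(false = true))]
        cases hget : seen.get? (orbS K G r.toNat) with
        | none =>
          refine hsim (seen.insert (orbS K G r.toNat) (r, orbM K G r.toNat)) ?_
          intro _ s' r0 m0 hmem
          rw [PySem.Dict.get?_insert] at hmem
          by_cases he : s' = orbS K G r.toNat
          · rw [if_pos he] at hmem
            obtain ⟨h1, h2⟩ := Prod.mk.injEq .. ▸ (Option.some.injEq .. ▸ hmem)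
            refine ⟨by omega, by omega, by rw [← h2, ← h1], by rw [← h1, he]⟩
          · rw [if_neg he] at hmem
            obtain ⟨a1, a2, a3, a4⟩ := hInv rfl s' r0 m0 hmem
            exact ⟨a1, by omega, a3, a4⟩
        | some p =>
          obtain ⟨r0, m0⟩ := p
          obtain ⟨h0, hlt, hm0, hS0⟩ := hInv rfl _ _ _ hget
          have hL : 0 < r - r0 := by omega
          have hcyc0 : 0 ≤ PySem.Int.floordiv (R - r) (r - r0) :=
            (PySem.Int.le_floordiv_iff_mul_le hL).mpr (by omega)
          have hcycle : PySem.Int.floordiv (R - r) (r - r0) * (r - r0) ≤ R - r :=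
            (PySem.Int.le_floordiv_iff_mul_le hL).mp le_rfl
          set cycles := PySem.Int.floordiv (R - r) (r - r0) with hcy
          have hSab : orbS K G r0.toNat = orbS K G r.toNat := by rw [hS0]
          have hab : r0.toNat ≤ r.toNat := by omega
          obtain ⟨cS, cM⟩ := orb_cycles K G r0.toNat r.toNat hab hSab cycles.toNat
          have hcl : cycles * (r - r0) = ((cycles.toNat * (r.toNat - r0.toNat) : Nat) : Int) := by
            push_cast [Int.toNat_of_nonneg hcyc0, Nat.cast_sub hab]
            have e1 : ((r.toNat : Int)) = r := Int.toNat_of_nonneg hr0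
            have e2 : ((r0.toNat : Int)) = r0 := Int.toNat_of_nonneg h0
            rw [e1, e2]
          have hmul0 : 0 ≤ cycles * (r - r0) := mul_nonneg hcyc0 (by omega)
          have htn : (r + cycles * (r - r0)).toNat = r.toNat + cycles.toNat * (r.toNat - r0.toNat) := by
            omega
          have hm : orbM K G r.toNat + cycles * (orbM K G r.toNat - m0)
              = orbM K G (r + cycles * (r - r0)).toNat := by
            rw [htn, cM, hm0, Int.toNat_of_nonneg hcyc0]
          have hs : orbS K G r.toNat = orbS K G (r + cycles * (r - r0)).toNat := by
            rw [htn, cS]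
          have e1 : (if (true : Bool) = true then (0 : Nat) else 1) = 0 := rfl
          have e0 : (if (false : Bool) = true then (0 : Nat) else 1) = 1 := rfl
          rw [e0] at hf
          have main := ih (r + cycles * (r - r0)) seen true (by omega) (by omega)
            (by rw [e1]; omega) (by simp)
          rw [← hm, ← hs] at main
          exact main
    · rw [if_neg hr]
      have : r = R := by omega
      rw [this]

lemma equal_aux_nonpos (R K : Int) (G : List Int) (hR : R ≤ 0) :
    countMoney R K G = countMoney_alt R K G := by
  have h1 : countMoney R K G = 0 := by
    unfold countMoney
    rw [Int.toNat_of_nonpos (by omega)]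
    simp
  have h2 : countMoney_alt R K G = 0 := by
    unfold countMoney_alt loopB
    rw [if_neg (by omega)]
  rw [h1, h2]

theorem equal_aux (R K : Int) (G : List Int) (hPre : G ≠ [] ∨ R ≤ 0) :
    countMoney R K G = countMoney_alt R K G := by
  rcases lt_or_ge R 1 with hR | hR
  · exact equal_aux_nonpos R K G (by omega)
  · have hG : G ≠ [] := by
      rcases hPre with h | h
      · exact h
      · omega
    rw [countMoney_eq_orbM R K G hG]
    have h := loopB_correct R K G (R.toNat + 2) 0 PySem.Dict.empty false
      le_rfl (by omega) (by split_ifs <;> omega)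
      (by intro _ s' r0 m0 hmem; rw [PySem.Dict.get?_empty] at hmem; exact absurd hmem (by simp))
    have h0 : orbM K G (0 : Int).toNat = 0 := rfl
    have h0' : orbS K G (0 : Int).toNat = 0 := rfl
    rw [h0, h0'] at h
    unfold countMoney_alt
    exact h.symm

-- ===== VERDICT (by name: the statement is the Claim_ definition above) =====
theorem countMoney_spec : Claim_equal_countMoney := by
  intro R K G _ hPre
  exact equal_aux R K G hPre
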